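-- pv_equiv track=rewrite | github.com/danielcdl/funcoes-matematicas | numero_por_extenso.py | unidade_dezena_centena
-- ===== SOURCE A (Python) =====
-- UNIDADES = ('zero', 'um', 'dois', 'três', 'quatro', 'cinco', 'seis', 'sete', 'oito', 'nove')
--
-- DEZENA_ESPECIAL = ('', 'onze', 'doze', 'treze', 'quatorze', 'quinze', 'dezesseis', 'dezessete', 'dezoito', 'dezenove')
--
-- DEZENAS = ('', 'dez', 'vinte', 'trinta', 'quarenta', 'cincoenta', 'sessenta', 'setenta', 'oitenta', 'noventa')
--
-- CENTENAS = ('cem', 'cento', 'duzentos', 'trezentos', 'quatrocentos', 'quinhentos', 'seiscentos', 'setecentos','oitocentos', 'novecentos')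
--
-- def unidade_dezena_centena(terno):
--     numero_extenso = ''
--     termos = len(terno)
--     digito = terno[0]
--     if termos == 3:
--         if digito != 0:
--             if terno[1:] == [0, 0]:
--                 if digito == 1:
--                     numero_extenso += CENTENAS[0]
--                 else:
--                     numero_extenso += CENTENAS[digito]
--             else:
--                 numero_extenso += CENTENAS[digito] + ' e '
--                 numero_extenso += unidade_dezena_centena(terno[1:])
--         else:
--             numero_extenso += unidade_dezena_centena(terno[1:])
--     if termos == 2:
--         if digito != 0:
--                 if terno[1] == 0:
--                     numero_extenso += DEZENAS[digito]
--                 elif digito == 1: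
--                     numero_extenso += DEZENA_ESPECIAL[terno[1]]
--                 else:
--                     numero_extenso += DEZENAS[digito] + ' e ' + unidade_dezena_centena(terno[1:])
--         else:
--             numero_extenso += unidade_dezena_centena(terno[1:])
--     elif termos == 1:
--         numero_extenso += UNIDADES[digito]
--
--     return numero_extenso
-- ===== SOURCE B (Python) =====
-- UNIDADES = ('zero', 'um', 'dois', 'três', 'quatro', 'cinco', 'seis', 'sete', 'oito', 'nove')
--
-- DEZENA_ESPECIAL = ('', 'onze', 'doze', 'treze', 'quatorze', 'quinze', 'dezesseis', 'dezessete', 'dezoito', 'dezenove')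
--
-- DEZENAS = ('', 'dez', 'vinte', 'trinta', 'quarenta', 'cincoenta', 'sessenta', 'setenta', 'oitenta', 'noventa')
--
-- CENTENAS = ('cem', 'cento', 'duzentos', 'trezentos', 'quatrocentos', 'quinhentos', 'seiscentos', 'setecentos','oitocentos', 'novecentos')
--
--
-- def _dois(d, u):
--     # two-digit group [d, u], by direct indexing
--     if d == 0:
--         return UNIDADES[u]
--     if u == 0:
--         return DEZENAS[d]
--     if d == 1:
--         return DEZENA_ESPECIAL[u]
--     return DEZENAS[d] + ' e ' + UNIDADES[u]
--
--
-- def unidade_dezena_centena(terno):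
--     # flat, non-recursive: branch on the length and index directly
--     if len(terno) == 1:
--         return UNIDADES[terno[0]]
--     if len(terno) == 2:
--         return _dois(terno[0], terno[1])
--     if len(terno) == 3:
--         c, d, u = terno
--         if c == 0:
--             return _dois(d, u)
--         if d == 0 and u == 0:
--             return 'cem' if c == 1 else CENTENAS[c]
--         return CENTENAS[c] + ' e ' + _dois(d, u)
--     return ''  # not a 1-to-3-digit group: nothing to say
-- ===== Notes on version B (the rewrite author's own statement) =====
-- stated objective: simpler
-- what changed: Replaced A's recursive slice-and-accumulate (self-calls on terno[1:] with a growing string) by a flat non-recursive function that branches on len(terno) and builds each result by direct indexing, with one tiny two-digit helper.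
-- crash fix: On the empty list A raises IndexError (it reads terno[0] before any length check); B returns '' (empty contribution). — e.g. on unidade_dezena_centena([]): A raises IndexError, B returns ""
import Mathlib
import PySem

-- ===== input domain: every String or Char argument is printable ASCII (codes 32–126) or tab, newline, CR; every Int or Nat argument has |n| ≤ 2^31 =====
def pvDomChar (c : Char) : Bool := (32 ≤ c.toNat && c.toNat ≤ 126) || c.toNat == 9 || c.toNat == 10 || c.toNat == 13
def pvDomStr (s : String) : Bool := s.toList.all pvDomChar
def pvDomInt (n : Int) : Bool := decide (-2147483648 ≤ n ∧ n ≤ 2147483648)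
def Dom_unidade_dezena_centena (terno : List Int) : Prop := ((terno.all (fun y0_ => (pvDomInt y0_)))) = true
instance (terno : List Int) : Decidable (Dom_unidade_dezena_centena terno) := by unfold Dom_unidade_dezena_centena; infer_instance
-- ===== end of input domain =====

-- B is a flat, non-recursive re-decomposition (objective: simpler); equivalence proved on 1-to-3-digit groups with digits in -9..9.

def UNIDADES : List String := ["zero", "um", "dois", "três", "quatro", "cinco", "seis", "sete", "oito", "nove"]
def DEZENA_ESPECIAL : List String := ["", "onze", "doze", "treze", "quatorze", "quinze", "dezesseis", "dezessete", "dezoito", "dezenove"]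
def DEZENAS : List String := ["", "dez", "vinte", "trinta", "quarenta", "cincoenta", "sessenta", "setenta", "oitenta", "noventa"]
def CENTENAS : List String := ["cem", "cento", "duzentos", "trezentos", "quatrocentos", "quinhentos", "seiscentos", "setecentos", "oitocentos", "novecentos"]

-- ===== PORT A =====
-- literal transliteration of A: accumulating string, recursion on terno[1:]
def unidade_dezena_centena (terno : List Int) : String :=
  let digito : Int := PySem.List.pyGetD terno 0 0   -- terno[0]; empty list raises, excluded by Pre_
  let n1 : String :=
    if (terno.length : Int) = 3 then
      (if digito ≠ 0 then
        (if PySem.List.slice terno (some 1) none = [0, 0] then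
          (if digito = 1 then PySem.List.pyGetD CENTENAS 0 ""
           else PySem.List.pyGetD CENTENAS digito "")
         else PySem.List.pyGetD CENTENAS digito "" ++ " e "
              ++ unidade_dezena_centena (PySem.List.slice terno (some 1) none))
       else unidade_dezena_centena (PySem.List.slice terno (some 1) none))
    else ""
  let n2 : String :=
    if (terno.length : Int) = 2 then
      (if digito ≠ 0 then
        (if PySem.List.pyGetD terno 1 0 = 0 then PySem.List.pyGetD DEZENAS digito ""
         else if digito = 1 then PySem.List.pyGetD DEZENA_ESPECIAL (PySem.List.pyGetD terno 1 0) ""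
         else PySem.List.pyGetD DEZENAS digito "" ++ " e "
              ++ unidade_dezena_centena (PySem.List.slice terno (some 1) none))
       else unidade_dezena_centena (PySem.List.slice terno (some 1) none))
    else if (terno.length : Int) = 1 then PySem.List.pyGetD UNIDADES digito ""
    else ""
  n1 ++ n2
termination_by terno.length
decreasing_by
  all_goals cases terno with
    | nil => simp_all
    | cons x xs => simp [PySem.List.slice_from_one]

-- ===== PORT B =====
-- two-digit group [d, u] by direct indexing (Source B's _dois)
def pvDois (d u : Int) : String :=
  if d = 0 then PySem.List.pyGetD UNIDADES u ""
  else if u = 0 then PySem.List.pyGetD DEZENAS d ""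
  else if d = 1 then PySem.List.pyGetD DEZENA_ESPECIAL u ""
  else PySem.List.pyGetD DEZENAS d "" ++ " e " ++ PySem.List.pyGetD UNIDADES u ""

-- flat, non-recursive: branch on the length and index directly
def unidade_dezena_centena_alt (terno : List Int) : String :=
  match terno with
  | [u] => PySem.List.pyGetD UNIDADES u ""
  | [d, u] => pvDois d u
  | [c, d, u] =>
      if c = 0 then pvDois d u
      else if d = 0 ∧ u = 0 then (if c = 1 then "cem" else PySem.List.pyGetD CENTENAS c "")
      else PySem.List.pyGetD CENTENAS c "" ++ " e " ++ pvDois d u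
  | _ => ""   -- not a 1-to-3-digit group: nothing to say (Source B's final return '')

-- ===== PRECONDITION & SPEC =====
-- Pre_ excludes exactly the inputs on which A raises IndexError: the empty list, and
-- 1-to-3-element lists containing a digit outside Python's valid index range -10..9.
def Pre_unidade_dezena_centena (terno : List Int) : Prop :=
  terno ≠ [] ∧ (terno.length ≤ 3 → ∀ d ∈ terno, -10 ≤ d ∧ d ≤ 9)
instance (terno : List Int) : Decidable (Pre_unidade_dezena_centena terno) := by
  unfold Pre_unidade_dezena_centena; infer_instance

def pvWitness_unidade_dezena_centena : List Int := [1, 0, 5]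

-- On the empty list A raises IndexError (terno[0]); B returns '' (empty contribution).
def Raises_unidade_dezena_centena (terno : List Int) : Prop := terno = []
instance (terno : List Int) : Decidable (Raises_unidade_dezena_centena terno) := by
  unfold Raises_unidade_dezena_centena; infer_instance
def pvRaiseWitness_unidade_dezena_centena : List Int := []
def pvRaiseWitnessOut_unidade_dezena_centena : String := ""

def Spec_unidade_dezena_centena (terno : List Int) (out : String) : Prop := out = unidade_dezena_centena_alt terno
instance (terno : List Int) (out : String) : Decidable (Spec_unidade_dezena_centena terno out) := by unfold Spec_unidade_dezena_centena; infer_instance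

-- ===== CLAIM (what is proved, stated in full; the proofs are below) =====
def Claim_equal_unidade_dezena_centena : Prop := ∀ (terno : List Int), Dom_unidade_dezena_centena terno → Pre_unidade_dezena_centena terno → Spec_unidade_dezena_centena terno (unidade_dezena_centena terno)

def Claim_raises_unidade_dezena_centena : Prop := (∀ (terno : List Int), Dom_unidade_dezena_centena terno → Raises_unidade_dezena_centena terno → ¬ Pre_unidade_dezena_centena terno) ∧ (Dom_unidade_dezena_centena (pvRaiseWitness_unidade_dezena_centena) ∧ Raises_unidade_dezena_centena (pvRaiseWitness_unidade_dezena_centena) ∧ unidade_dezena_centena_alt (pvRaiseWitness_unidade_dezena_centena) = pvRaiseWitnessOut_unidade_dezena_centena)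

-- ===== LEMMAS AND PROOFS =====
lemma A_big (terno : List Int) (h : 4 ≤ terno.length) : unidade_dezena_centena terno = "" := by
  rw [unidade_dezena_centena]
  have h3 : ¬((terno.length : Int) = 3) := by omega
  have h2 : ¬((terno.length : Int) = 2) := by omega
  have h1 : ¬((terno.length : Int) = 1) := by omega
  simp [h3, h2, h1]

lemma A_one (u : Int) : unidade_dezena_centena [u] = PySem.List.pyGetD UNIDADES u "" := by
  rw [unidade_dezena_centena]
  simp [PySem.List.pyGetD_zero_cons]

lemma A_two (d u : Int) : unidade_dezena_centena [d, u] = pvDois d u := by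
  rw [unidade_dezena_centena]
  simp only [PySem.List.slice_from_one, List.tail_cons, List.length_cons, List.length_nil,
    PySem.List.pyGetD_zero_cons]
  have h1 : PySem.List.pyGetD [d, u] 1 0 = u := by
    simp [PySem.List.pyGetD, PySem.List.pyGet?, PySem.List.pyIdx?]
  rw [A_one]
  by_cases hd : d = 0 <;> by_cases hu : u = 0 <;> by_cases hd1 : d = 1 <;>
    simp [pvDois, hd, hu, hd1, PySem.List.pyGetD, PySem.List.pyGet?, PySem.List.pyIdx?]

lemma A_three (c d u : Int) :
    unidade_dezena_centena [c, d, u] = unidade_dezena_centena_alt [c, d, u] := by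
  rw [unidade_dezena_centena]
  simp only [PySem.List.slice_from_one, List.tail_cons, List.length_cons, List.length_nil,
    PySem.List.pyGetD_zero_cons]
  rw [A_two]
  by_cases hc : c = 0 <;> by_cases hd : d = 0 <;> by_cases hu : u = 0 <;> by_cases hc1 : c = 1 <;>
    simp [unidade_dezena_centena_alt, hc, hd, hu, hc1, CENTENAS,
      PySem.List.pyGetD, PySem.List.pyGet?, PySem.List.pyIdx?]

-- ===== VERDICT (by name: the statement is the Claim_ definition above) =====
theorem unidade_dezena_centena_spec : Claim_equal_unidade_dezena_centena := by
  intro terno _ hpre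
  unfold Spec_unidade_dezena_centena
  obtain ⟨hne, -⟩ := hpre
  match terno with
  | [] => exact absurd rfl hne
  | [u] => rw [A_one]; rfl
  | [d, u] => rw [A_two]; rfl
  | [c, d, u] => exact A_three c d u
  | a :: b :: c :: d :: rest => rw [A_big _ (by simp)]; rfl

@[simp] theorem unidade_dezena_centena_raises : Claim_raises_unidade_dezena_centena := by
  unfold Claim_raises_unidade_dezena_centena
  exact ⟨fun terno _ hr hp => hp.1 hr, by decide⟩
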